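-- pv_equiv track=rewrite | github.com/BernardMoy/Advent-of-code-2023 | Desktop/aoc/day14/aoc14part2.py | func
-- ===== SOURCE A (Python) =====
-- def func(col):
--     sum = 0
--     val = len(col)
--
--     for i in range(len(col)):
--         if col[i] == 'O':
--             sum += val
--             val -= 1
--         if col[i] == '.':
--             continue
--         if col[i] == '#':
--             val = len(col) - i - 1
--
--     return sum
-- ===== SOURCE B (Python) =====
-- def func(col):
--     n = len(col)
--     total = 0
--     count = 0
--     top = n
--     for i in range(n):
--         c = col[i]
--         if c == 'O':
--             count += 1
--         elif c == '#':
--             total += count * top - count * (count - 1) // 2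
--             count = 0
--             top = n - i - 1
--     return total + count * top - count * (count - 1) // 2
-- ===== Notes on version B (the rewrite author's own statement) =====
-- stated objective: alternative
-- what changed: B replaces A's per-rock running-value decrement with per-segment counting: it counts 'O's per '#'-delimited segment and adds the closed-form arithmetic-series sum count*top - count*(count-1)//2 at each segment boundary.
import Mathlib
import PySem

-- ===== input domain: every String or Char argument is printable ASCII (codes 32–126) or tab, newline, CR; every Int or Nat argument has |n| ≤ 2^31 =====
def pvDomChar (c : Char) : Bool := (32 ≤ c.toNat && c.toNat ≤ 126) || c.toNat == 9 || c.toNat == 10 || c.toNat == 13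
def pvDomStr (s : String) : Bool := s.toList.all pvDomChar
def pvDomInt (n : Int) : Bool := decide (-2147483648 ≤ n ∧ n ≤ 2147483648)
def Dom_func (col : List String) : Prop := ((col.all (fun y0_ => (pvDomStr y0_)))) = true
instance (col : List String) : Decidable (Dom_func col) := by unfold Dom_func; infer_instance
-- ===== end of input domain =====

-- B replaces A's per-rock running-value decrement with per-segment counting and a closed-form series sum; same O(n) cost.

-- ===== PORT A =====
-- A's loop over i in range(len(col)): state (sum, val); 'O' adds val and decrements, '#' resets val.
def funcLoop (n : Int) : List String → Nat → Int → Int → Int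
  | [], _, sum, _ => sum
  | c :: rest, i, sum, val =>
    let s' := if c = "O" then sum + val else sum
    let v' := if c = "O" then val - 1 else val
    let v'' := if c = "#" then n - (i : Int) - 1 else v'
    funcLoop n rest (i + 1) s' v''

def func (col : List String) : Int :=
  funcLoop (col.length : Int) col 0 0 (col.length : Int)

-- ===== PORT B =====
-- B's loop: state (total, count, top); flush count*top - count*(count-1)//2 at each '#' and at the end.
def funcAltLoop (n : Int) : List String → Nat → Int → Int → Int → Int
  | [], _, total, count, top =>
      total + count * top - PySem.Int.floordiv (count * (count - 1)) 2
  | c :: rest, i, total, count, top =>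
    if c = "O" then funcAltLoop n rest (i + 1) total (count + 1) top
    else if c = "#" then
      funcAltLoop n rest (i + 1)
        (total + count * top - PySem.Int.floordiv (count * (count - 1)) 2) 0 (n - (i : Int) - 1)
    else funcAltLoop n rest (i + 1) total count top

def func_alt (col : List String) : Int :=
  funcAltLoop (col.length : Int) col 0 0 0 (col.length : Int)

-- ===== PRECONDITION & SPEC =====
def Spec_func (col : List String) (out : Int) : Prop := out = func_alt col
instance (col : List String) (out : Int) : Decidable (Spec_func col out) := by unfold Spec_func; infer_instance

-- ===== CLAIM (what is proved, stated in full; the proofs are below) =====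
def Claim_equal_func : Prop := ∀ (col : List String), Dom_func col → Spec_func col (func col)

-- ===== LEMMAS AND PROOFS =====

-- triangular increment: (c+1)*c // 2 = c*(c-1) // 2 + c
theorem tri_succ (c : Int) :
    PySem.Int.floordiv ((c + 1) * c) 2 = PySem.Int.floordiv (c * (c - 1)) 2 + c := by
  have h : (c + 1) * c = c * (c - 1) + c * 2 := by ring
  rw [h]
  have h2 : (0 : Int) < 2 := by norm_num
  rw [PySem.Int.floordiv_eq_ediv_of_pos h2, PySem.Int.floordiv_eq_ediv_of_pos h2]
  exact Int.add_mul_ediv_right _ _ (by norm_num)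

theorem loop_eq (n : Int) (l : List String) :
    ∀ (i : Nat) (total count top : Int),
      funcLoop n l i (total + count * top - PySem.Int.floordiv (count * (count - 1)) 2)
        (top - count)
      = funcAltLoop n l i total count top := by
  induction l with
  | nil =>
    intro i total count top
    simp [funcLoop, funcAltLoop]
  | cons c rest ih =>
    intro i total count top
    by_cases hO : c = "O"
    · have hne : c ≠ "#" := by rw [hO]; decide
      simp only [funcLoop, funcAltLoop, hO, if_neg (by decide : ("O" : String) ≠ "#")]
      have e1 : total + count * top - PySem.Int.floordiv (count * (count - 1)) 2 + (top - count)
          = total + (count + 1) * top - PySem.Int.floordiv ((count + 1) * (count + 1 - 1)) 2 := by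
        simp only [add_sub_cancel_right]
        rw [tri_succ count]; ring
      have e2 : top - count - 1 = top - (count + 1) := by ring
      rw [e1, e2]
      exact ih (i + 1) total (count + 1) top
    · by_cases hH : c = "#"
      · subst hH
        simp only [funcLoop, funcAltLoop, if_neg hO]
        have h1 := ih (i + 1)
          (total + count * top - PySem.Int.floordiv (count * (count - 1)) 2) 0 (n - (i:Int) - 1)
        simpa [PySem.Int.floordiv] using h1
      · simp only [funcLoop, funcAltLoop, if_neg hO, if_neg hH]
        exact ih (i + 1) total count top

-- ===== VERDICT (by name: the statement is the Claim_ definition above) =====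
theorem func_spec : Claim_equal_func := by
  intro col _
  unfold Spec_func func func_alt
  have h := loop_eq (col.length : Int) col 0 0 0 (col.length : Int)
  simpa [PySem.Int.floordiv] using h
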